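-- pv_equiv track=rewrite | github.com/abhaythakur754-0/parwa | backend/app/tests/test_day2_security.py | _extract_service
-- ===== SOURCE A (Python) =====
-- def _extract_service(content: str, service_key: str) -> str:
--     """Extract a service block from docker-compose content by its key (e.g. 'db:')."""
--     lines = content.split("\n")
--     in_service = False
--     service_lines = []
--     for line in lines:
--         stripped = line.lstrip()
--         if not in_service:
--             if stripped == service_key and line == "  " + service_key:
--                 in_service = True
--                 service_lines.append(line)
--                 continue
--         else:
--             # End of service: next 2-space indent key or top-level key
--             if (
--                 line
--                 and not line.startswith("    ")
--                 and not line.startswith("#")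
--                 and stripped
--             ):
--                 break
--             service_lines.append(line)
--     return "\n".join(service_lines)
-- ===== SOURCE B (Python) =====
-- def _is_block_start(line):
--     """A line that begins a new block at this indentation model:
--     non-empty, not indented four spaces, not a comment, not whitespace-only."""
--     return bool(line) and not line.startswith("    ") and not line.startswith("#") and bool(line.lstrip())
--
-- def _blocks(lines):
--     """Partition the whole document into blocks: every block-start line opens a
--     new block and carries all following non-block-start lines with it."""
--     blocks = []
--     i = 0
--     while i < len(lines):
--         j = i + 1
--         while j < len(lines) and not _is_block_start(lines[j]):
--             j += 1
--         blocks.append(lines[i:j])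
--         i = j
--     return blocks
--
-- def _extract_service(content: str, service_key: str) -> str:
--     """Extract a service block from docker-compose content by its key (e.g. 'db:')."""
--     for block in _blocks(content.split("\n")):
--         if block[0].lstrip() == service_key and block[0] == "  " + service_key:
--             return "\n".join(block)
--     return ""
-- ===== Notes on version B (the rewrite author's own statement) =====
-- stated objective: alternative
-- what changed: B parses the whole document once into indentation blocks (every block-start line opens a block that carries the following indented/comment/blank lines) and then looks the service up among the block heads, instead of A's single scan with an in_service flag that starts at the header and breaks at the end condition.
-- intended difference: When service_key is the empty string and a bare two-space line ' ' occurs anywhere after the first line, A matches that blank line as a 'header' and returns it plus the following blank/comment lines, while B returns '' — an empty key names no service, so the empty string is the intended result. — e.g. on _extract_service("x:\n ", ""): A returns " ", B returns ""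
import Mathlib
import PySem

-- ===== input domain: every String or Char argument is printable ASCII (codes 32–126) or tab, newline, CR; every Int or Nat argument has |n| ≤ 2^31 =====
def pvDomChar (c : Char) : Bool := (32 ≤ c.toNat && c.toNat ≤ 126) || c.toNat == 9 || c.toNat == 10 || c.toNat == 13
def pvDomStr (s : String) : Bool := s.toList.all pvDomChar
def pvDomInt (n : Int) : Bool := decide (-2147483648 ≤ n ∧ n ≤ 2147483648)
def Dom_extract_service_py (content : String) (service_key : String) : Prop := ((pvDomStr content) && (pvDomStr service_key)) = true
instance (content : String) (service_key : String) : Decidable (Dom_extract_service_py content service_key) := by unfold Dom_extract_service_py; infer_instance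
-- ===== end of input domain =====

-- B parses the document once into indentation blocks and looks the service up among the block heads,
-- instead of A's in_service-flag scan (alternative, same cost); on the degenerate empty service_key
-- B intentionally returns "" where A may match a bare two-space blank line (see D_ below).

-- ===== PORT A =====
-- A's for-loop over lines with state (in_service, service_lines), transliterated as structural recursion.
def pvLoopA (service_key : String) : List String → Bool → List String → List String
  | [], _, acc => acc
  | line :: rest, inService, acc =>
    let stripped := PySem.Str.lstrip line
    if !inService then
      if stripped == service_key && line == "  " ++ service_key then
        pvLoopA service_key rest true (acc ++ [line])
      else
        pvLoopA service_key rest false acc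
    else
      if !(line == "") && !(PySem.Str.startswith line "    ")
          && !(PySem.Str.startswith line "#") && !(stripped == "") then
        acc
      else
        pvLoopA service_key rest true (acc ++ [line])

def extract_service_py (content : String) (service_key : String) : String :=
  -- content.split("\n"): the separator is the nonempty literal "\n", so split? is always `some`
  let lines := (PySem.Str.split? content "\n").getD []
  PySem.Str.join "\n" (pvLoopA service_key lines false [])

-- ===== PORT B =====
-- Source B's _is_block_start
def pvIsBlockStart (line : String) : Bool :=
  !(line == "") && !(PySem.Str.startswith line "    ")
    && !(PySem.Str.startswith line "#") && !(PySem.Str.lstrip line == "")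

-- Source B's _blocks: the outer while-loop is this recursion (the list length bounds the number of
-- iterations, carried as structural fuel so the definition stays kernel-reducible); the inner
-- while-loop scanning to the next block start is takeWhile/dropWhile of the non-block-start run.
def pvBlocksBGo (pvIsStart : String → Bool) : Nat → List String → List (List String)
  | 0, _ => []
  | _, [] => []
  | fuel + 1, l :: rest =>
    (l :: rest.takeWhile (fun x => !pvIsStart x)) ::
      pvBlocksBGo pvIsStart fuel (rest.dropWhile (fun x => !pvIsStart x))

def pvBlocksB (lines : List String) : List (List String) :=
  pvBlocksBGo pvIsBlockStart lines.length lines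

-- Source B's search loop over the blocks ([] :: _ never occurs in pvBlocksB output; the branch keeps the match total)
def pvFindBlock (service_key : String) : List (List String) → String
  | [] => ""
  | [] :: rest => pvFindBlock service_key rest
  | (h :: t) :: rest =>
    if PySem.Str.lstrip h == service_key && h == "  " ++ service_key then
      PySem.Str.join "\n" (h :: t)
    else pvFindBlock service_key rest

def extract_service_py_alt (content : String) (service_key : String) : String :=
  let lines := (PySem.Str.split? content "\n").getD []
  pvFindBlock service_key (pvBlocksB lines)

-- ===== PRECONDITION & SPEC =====
-- When service_key is the empty string and a bare two-space line "  " occurs after the first line,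
-- A matches that blank line as a "header" and returns it plus the following blank/comment lines,
-- while B returns "" — an empty key names no service, so "" is the intended result.
def D_extract_service_py (content : String) (service_key : String) : Prop :=
  service_key = "" ∧ "  " ∈ (PySem.Str.split? content "\n").getD [] ∧
    ((PySem.Str.split? content "\n").getD []).head? ≠ some "  "
instance (content : String) (service_key : String) : Decidable (D_extract_service_py content service_key) := by unfold D_extract_service_py; infer_instance

def Spec_extract_service_py (content : String) (service_key : String) (out : String) : Prop := ¬ D_extract_service_py content service_key → out = extract_service_py_alt content service_key
instance (content : String) (service_key : String) (out : String) : Decidable (Spec_extract_service_py content service_key out) := by unfold Spec_extract_service_py; infer_instance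

def pvDiffWitness_extract_service_py : String × String := ("x:\n  ", "")
def pvDiffWitnessOut_extract_service_py : String × String := ("  ", "")

-- ===== CLAIM (what is proved, stated in full; the proofs are below) =====
def Claim_unchanged_extract_service_py : Prop := ∀ (content : String) (service_key : String), Dom_extract_service_py content service_key → Spec_extract_service_py content service_key (extract_service_py content service_key)
def Claim_changed_extract_service_py : Prop := Dom_extract_service_py (pvDiffWitness_extract_service_py.1) (pvDiffWitness_extract_service_py.2) ∧ D_extract_service_py (pvDiffWitness_extract_service_py.1) (pvDiffWitness_extract_service_py.2) ∧ extract_service_py (pvDiffWitness_extract_service_py.1) (pvDiffWitness_extract_service_py.2) = pvDiffWitnessOut_extract_service_py.1 ∧ extract_service_py_alt (pvDiffWitness_extract_service_py.1) (pvDiffWitness_extract_service_py.2) = pvDiffWitnessOut_extract_service_py.2 ∧ pvDiffWitnessOut_extract_service_py.1 ≠ pvDiffWitnessOut_extract_service_py.2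
def Claim_exact_extract_service_py : Prop := ∀ (content : String) (service_key : String), Dom_extract_service_py content service_key → D_extract_service_py content service_key → extract_service_py content service_key ≠ extract_service_py_alt content service_key

-- ===== LEMMAS AND PROOFS =====

-- A's header condition, named for the proofs
def pvIsHeaderB (service_key line : String) : Bool :=
  PySem.Str.lstrip line == service_key && line == "  " ++ service_key

-- what A's loop collects once in_service is set
def pvCollectB : List String → List String
  | [] => []
  | line :: rest => if pvIsBlockStart line then [] else line :: pvCollectB rest

theorem pvCollectB_eq_takeWhile (xs : List String) :
    pvCollectB xs = xs.takeWhile (fun x => !pvIsBlockStart x) := by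
  induction xs with
  | nil => rfl
  | cons x rest ih =>
    simp only [pvCollectB, List.takeWhile_cons]
    cases h : pvIsBlockStart x <;> simp [h, ih]

theorem pvLoopA_true (key : String) (lines acc : List String) :
    pvLoopA key lines true acc = acc ++ pvCollectB lines := by
  induction lines generalizing acc with
  | nil => simp [pvLoopA, pvCollectB]
  | cons l rest ih =>
    simp [pvLoopA, pvCollectB, pvIsBlockStart, ih]
    split_ifs <;> simp

theorem pvLoopA_false (key : String) (lines acc : List String) :
    pvLoopA key lines false acc =
      acc ++ (match lines.findIdx? (pvIsHeaderB key) with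
              | none => []
              | some start => ("  " ++ key) :: pvCollectB (lines.drop (start + 1))) := by
  induction lines generalizing acc with
  | nil => simp [pvLoopA]
  | cons l rest ih =>
    simp only [List.findIdx?_cons]
    by_cases h : pvIsHeaderB key l = true
    · have h' : (PySem.Str.lstrip l == key && l == "  " ++ key) = true := h
      have hl : l = "  " ++ key := by
        simp only [pvIsHeaderB, Bool.and_eq_true, beq_iff_eq] at h
        exact h.2
      simp only [pvLoopA, Bool.not_false, if_pos h', h]
      rw [pvLoopA_true]
      simp [hl]
    · have h' : ¬ (PySem.Str.lstrip l == key && l == "  " ++ key) = true := h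
      simp only [pvLoopA, Bool.not_false, if_neg h']
      rw [ih]
      simp only [h]
      cases List.findIdx? (pvIsHeaderB key) rest <;> simp

-- skipping non-header lines leaves A's searching phase unchanged
theorem pvLoopA_skip (key : String) (pre rest acc : List String)
    (h : ∀ x ∈ pre, pvIsHeaderB key x = false) :
    pvLoopA key (pre ++ rest) false acc = pvLoopA key rest false acc := by
  induction pre with
  | nil => rfl
  | cons p ps ih =>
    have hp : ¬ (PySem.Str.lstrip p == key && p == "  " ++ key) = true := by
      have := h p (by simp)
      simpa [pvIsHeaderB] using this
    simp only [List.cons_append, pvLoopA, Bool.not_false, if_neg hp]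
    exact ih (fun x hx => h x (by simp [hx]))

-- if no line is a header, A collects nothing
theorem pvLoopA_none (key : String) (lines acc : List String)
    (h : ∀ x ∈ lines, pvIsHeaderB key x = false) :
    pvLoopA key lines false acc = acc := by
  have := pvLoopA_skip key lines [] acc h
  simpa [pvLoopA] using this

-- a header line of a nonempty key is a block start
theorem pvHeader_isBlockStart (key l : String) (hk : key ≠ "")
    (h : pvIsHeaderB key l = true) : pvIsBlockStart l = true := by
  simp only [pvIsHeaderB, Bool.and_eq_true, beq_iff_eq] at h
  obtain ⟨h1, h2⟩ := h
  subst h2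
  have htl : ("  " ++ key).toList = ' ' :: ' ' :: key.toList := by
    simp [String.toList_append]
  have hkl : key.toList ≠ [] := by
    intro hnil
    have h0 : key.toList = "".toList := by rw [hnil]; rfl
    exact hk (String.toList_inj.mp h0)
  obtain ⟨c, ks, hck⟩ := List.exists_cons_of_ne_nil hkl
  have hstrip : PySem.Chars.lstrip (("  " ++ key).toList) = key.toList := by
    have := congrArg String.toList h1
    simpa [PySem.Str.lstrip] using this
  have hdrop : List.dropWhile PySem.Chars.isspace key.toList = key.toList := by
    rw [htl] at hstrip
    simpa [PySem.Chars.lstrip, PySem.Chars.isspace] using hstrip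
  have hc : PySem.Chars.isspace c = false := by
    rw [hck] at hdrop
    by_contra hcc
    simp only [Bool.not_eq_false] at hcc
    rw [List.dropWhile_cons, if_pos hcc] at hdrop
    have hlen := congrArg List.length hdrop
    have hle := List.length_dropWhile_le PySem.Chars.isspace ks
    simp at hlen
    omega
  have hcsp : c ≠ ' ' := by
    intro he; subst he; simp [PySem.Chars.isspace] at hc
  simp only [pvIsBlockStart, Bool.and_eq_true, Bool.not_eq_true']
  refine ⟨⟨⟨?_, ?_⟩, ?_⟩, ?_⟩
  · simp only [beq_eq_false_iff_ne, ne_eq]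
    intro he
    have := congrArg String.toList he
    simp [htl] at this
  · simp only [PySem.Str.startswith]
    simp only [PySem.Chars.startswith, htl, hck]
    have : "    ".toList = [' ', ' ', ' ', ' '] := rfl
    rw [this]
    simp [List.isPrefixOf]
    intro h
    exact absurd h.symm hcsp
  · simp only [PySem.Str.startswith]
    simp only [PySem.Chars.startswith, htl]
    have : "#".toList = ['#'] := rfl
    rw [this]
    simp [List.isPrefixOf]
  · simp only [beq_eq_false_iff_ne, ne_eq]
    intro he
    exact hk (h1.symm.trans he)

-- a block-start line is never a header of the empty key
theorem pvBlockStart_not_empty_header (x : String) (h : pvIsBlockStart x = true) :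
    pvIsHeaderB "" x = false := by
  simp only [pvIsBlockStart, Bool.and_eq_true, Bool.not_eq_true'] at h
  simp [pvIsHeaderB, h.2]

-- B finds nothing when neither the first line nor any block start is a header
theorem pvFindBlockGo_none (key : String) :
    ∀ (fuel : Nat) (lines : List String), lines.length ≤ fuel →
      (∀ x, lines.head? = some x → pvIsHeaderB key x = false) →
      (∀ x, pvIsBlockStart x = true → pvIsHeaderB key x = false) →
      pvFindBlock key (pvBlocksBGo pvIsBlockStart fuel lines) = "" := by
  intro fuel
  induction fuel with
  | zero =>
    intro lines hlen _ _
    have : lines = [] := List.eq_nil_of_length_eq_zero (Nat.le_zero.mp hlen)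
    subst this
    rfl
  | succ f ih =>
    intro lines hlen h1 h2
    cases lines with
    | nil => rfl
    | cons l rest =>
      have hl : pvIsHeaderB key l = false := h1 l rfl
      have hl' : ¬ (PySem.Str.lstrip l == key && l == "  " ++ key) = true := by
        simpa [pvIsHeaderB] using hl
      simp only [pvBlocksBGo, pvFindBlock, if_neg hl']
      apply ih
      · exact le_trans (List.length_dropWhile_le _ _) (Nat.succ_le_succ_iff.mp hlen)
      · intro x hx
        apply h2
        have hne : rest.dropWhile (fun x => !pvIsBlockStart x) ≠ [] := by
          intro he; rw [he] at hx; simp at hx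
        have hh := List.head_dropWhile_not (fun x => !pvIsBlockStart x) (l := rest) hne
        have hxh : (rest.dropWhile (fun x => !pvIsBlockStart x)).head hne = x := by
          rw [List.head?_eq_head hne] at hx
          exact Option.some.inj hx
        rw [hxh] at hh
        simpa using hh
      · exact h2

theorem pvFindBlock_none (key : String) (lines : List String)
    (h1 : ∀ x, lines.head? = some x → pvIsHeaderB key x = false)
    (h2 : ∀ x, pvIsBlockStart x = true → pvIsHeaderB key x = false) :
    pvFindBlock key (pvBlocksB lines) = "" :=
  pvFindBlockGo_none key lines.length lines le_rfl h1 h2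

-- with a nonempty-key-style hypothesis, B's block search equals A's scan
theorem pvFindGo_eq_loop (key : String)
    (hk : ∀ l, pvIsHeaderB key l = true → pvIsBlockStart l = true) :
    ∀ (fuel : Nat) (lines : List String), lines.length ≤ fuel →
      pvFindBlock key (pvBlocksBGo pvIsBlockStart fuel lines) =
        PySem.Str.join "\n" (pvLoopA key lines false []) := by
  intro fuel
  induction fuel with
  | zero =>
    intro lines hlen
    have : lines = [] := List.eq_nil_of_length_eq_zero (Nat.le_zero.mp hlen)
    subst this
    rfl
  | succ f ih =>
    intro lines hlen
    cases lines with
    | nil => rfl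
    | cons l rest =>
      have hA : pvLoopA key (l :: rest) false [] =
          if pvIsHeaderB key l = true then l :: pvCollectB rest
          else pvLoopA key rest false [] := by
        by_cases hm : pvIsHeaderB key l = true
        · have hm' : (PySem.Str.lstrip l == key && l == "  " ++ key) = true := hm
          simp only [pvLoopA, Bool.not_false, if_pos hm', if_pos hm]
          rw [pvLoopA_true]
          rfl
        · have hm' : ¬ (PySem.Str.lstrip l == key && l == "  " ++ key) = true := hm
          simp only [pvLoopA, Bool.not_false, if_neg hm', if_neg hm]
          simp
      by_cases hm : pvIsHeaderB key l = true
      · have hm' : (PySem.Str.lstrip l == key && l == "  " ++ key) = true := hm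
        simp only [pvBlocksBGo, pvFindBlock, if_pos hm']
        rw [hA, if_pos hm, pvCollectB_eq_takeWhile]
      · have hm' : ¬ (PySem.Str.lstrip l == key && l == "  " ++ key) = true := hm
        simp only [pvBlocksBGo, pvFindBlock, if_neg hm']
        rw [ih _ (le_trans (List.length_dropWhile_le _ _) (Nat.succ_le_succ_iff.mp hlen)),
          hA, if_neg hm]
        congr 1
        have hskip : pvLoopA key ((rest.takeWhile (fun x => !pvIsBlockStart x)) ++
            (rest.dropWhile (fun x => !pvIsBlockStart x))) false [] =
            pvLoopA key (rest.dropWhile (fun x => !pvIsBlockStart x)) false [] := by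
          apply pvLoopA_skip
          intro x hx
          have hb : (!pvIsBlockStart x) = true :=
            List.mem_takeWhile_imp (p := fun x => !pvIsBlockStart x) hx
          by_contra hh
          simp only [Bool.not_eq_false] at hh
          have := hk x hh
          simp [this] at hb
        rw [List.takeWhile_append_dropWhile] at hskip
        exact hskip.symm

theorem pvFind_eq_loop (key : String)
    (hk : ∀ l, pvIsHeaderB key l = true → pvIsBlockStart l = true)
    (lines : List String) :
    pvFindBlock key (pvBlocksB lines) = PySem.Str.join "\n" (pvLoopA key lines false []) :=
  pvFindGo_eq_loop key hk lines.length lines le_rfl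

-- ===== VERDICT (by name: the statement is the Claim_ definition above) =====
theorem extract_service_py_spec : Claim_unchanged_extract_service_py := by
  intro content service_key _
  unfold Spec_extract_service_py
  intro hnD
  simp only [extract_service_py, extract_service_py_alt]
  set lines := (PySem.Str.split? content "\n").getD [] with hlines
  by_cases hk : service_key = ""
  · subst hk
    rw [D_extract_service_py] at hnD
    push_neg at hnD
    by_cases hmem : "  " ∈ lines
    · have hhead := hnD rfl (by rw [← hlines]; exact hmem)
      rw [← hlines] at hhead
      obtain ⟨rest, hlr⟩ : ∃ rest, lines = "  " :: rest := by
        cases hl : lines with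
        | nil => rw [hl] at hmem; simp at hmem
        | cons a t =>
          rw [hl] at hhead
          simp at hhead
          exact ⟨t, by rw [hhead]⟩
      rw [hlr]
      have hc : (PySem.Str.lstrip "  " == "" && "  " == "  " ++ "") = true := by decide
      simp only [pvLoopA, pvBlocksB, Bool.not_false, if_pos hc]
      rw [pvLoopA_true, pvCollectB_eq_takeWhile]
      rfl
    · rw [pvLoopA_none "" lines [] ?_, pvFindBlock_none "" lines ?_ pvBlockStart_not_empty_header]
      · simp [PySem.Str.join, PySem.Chars.join, List.intercalate]
      · intro x hx
        have hxm : x ∈ lines := List.mem_of_mem_head? hx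
        have hne : x ≠ "  " := fun he => hmem (he ▸ hxm)
        simp [pvIsHeaderB]
        intro _
        exact hne
      · intro x hx
        have hne : x ≠ "  " := fun he => hmem (he ▸ hx)
        simp [pvIsHeaderB]
        intro _
        exact hne
  · exact (pvFind_eq_loop service_key (fun l => pvHeader_isBlockStart service_key l hk) lines).symm

theorem extract_service_py_changed : Claim_changed_extract_service_py := by
  unfold Claim_changed_extract_service_py; decide

theorem extract_service_py_tight : Claim_exact_extract_service_py := by
  intro content service_key _ hD
  obtain ⟨hk, hmem, hhead⟩ := hD
  subst hk
  simp only [extract_service_py, extract_service_py_alt]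
  set lines := (PySem.Str.split? content "\n").getD [] with hlines
  have hB : pvFindBlock "" (pvBlocksB lines) = "" := by
    apply pvFindBlock_none "" lines ?_ pvBlockStart_not_empty_header
    intro x hx
    have hne : x ≠ "  " := by
      intro he; rw [he] at hx; exact hhead hx
    simp [pvIsHeaderB]
    intro _
    exact hne
  rw [hB, pvLoopA_false]
  have hfind : lines.findIdx? (pvIsHeaderB "") ≠ none := by
    intro hnone
    have hfalse := List.findIdx?_eq_none_iff.mp hnone "  " hmem
    have htrue : pvIsHeaderB "" "  " = true := by decide
    rw [htrue] at hfalse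
    exact absurd hfalse (by simp)
  cases hf : lines.findIdx? (pvIsHeaderB "") with
  | none => exact absurd hf hfind
  | some s =>
    simp only [List.nil_append]
    intro he
    have := congrArg String.toList he
    cases ht : pvCollectB (lines.drop (s + 1)) with
    | nil => rw [ht] at this; simp [PySem.Str.join, PySem.Chars.join, List.intercalate] at this
    | cons a t => rw [ht] at this; simp [PySem.Str.join, PySem.Chars.join, List.intercalate] at this
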